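-- pv_equiv track=rewrite | github.com/alexsotocx/algorithms | Topcoder/Python/ANDEquation.py | restoreY
-- ===== SOURCE A (Python) =====
-- def restoreY(A):
--   for i in range(len(A)):
--     m =  (1 << 20) - 1
--     for j in range(len(A)):
--       if i != j:
--         m &= A[j]
--     if m == A[i]:
--       return A[i]
--   return -1
-- ===== SOURCE B (Python) =====
-- def restoreY(A):
--     n = len(A)
--     suf = [(1 << 20) - 1] * (n + 1)
--     for j in range(n - 1, -1, -1):
--         suf[j] = suf[j + 1] & A[j]
--     pre = (1 << 20) - 1
--     for i in range(n):
--         if pre & suf[i + 1] == A[i]: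
--             return A[i]
--         pre &= A[i]
--     return -1
-- ===== Notes on version B (the rewrite author's own statement) =====
-- stated objective: faster
-- what changed: Replaced A's recomputation of the AND of all other elements for every index (nested loops) by a single right-to-left suffix-AND array plus a running prefix AND, giving AND-except-i in O(1) per index.
import Mathlib
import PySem

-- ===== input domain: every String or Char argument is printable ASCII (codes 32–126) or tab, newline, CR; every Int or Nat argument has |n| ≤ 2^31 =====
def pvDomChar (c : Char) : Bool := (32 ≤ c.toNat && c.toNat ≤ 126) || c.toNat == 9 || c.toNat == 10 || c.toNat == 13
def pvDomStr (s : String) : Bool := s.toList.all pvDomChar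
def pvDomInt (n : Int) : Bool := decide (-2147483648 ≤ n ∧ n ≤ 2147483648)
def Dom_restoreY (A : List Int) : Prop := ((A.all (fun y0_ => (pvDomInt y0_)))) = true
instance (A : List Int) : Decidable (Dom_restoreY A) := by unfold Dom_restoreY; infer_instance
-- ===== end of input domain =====

-- B replaces A's nested loops (AND over all other elements recomputed for every i) by one
-- right-to-left suffix-AND array plus a running prefix AND; same result for every input.

-- ===== PORT A =====
-- inner loop of A: m = (1<<20)-1; for j in range(len(A)): if i != j: m &= A[j]
def restoreYInner (A : List Int) (i : Nat) : Int :=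
  (List.range A.length).foldl
    (fun m j => if i ≠ j then PySem.Int.band m (A.getD j 0) else m)
    ((1 : Int) <<< 20 - 1)

-- outer loop of A over the remaining indices i; first hit returns A[i], else -1
def restoreYLoop (A : List Int) : List Nat → Int
  | [] => -1
  | i :: rest =>
    let m := restoreYInner A i
    if m = A.getD i 0 then A.getD i 0 else restoreYLoop A rest

def restoreY (A : List Int) : Int := restoreYLoop A (List.range A.length)

-- ===== PORT B =====
-- suffix-AND array of Source B: sufAnds l = [suf_0, ..., suf_n] with suf_n = (1<<20)-1 and
-- suf_j = suf_{j+1} & A[j]; built by the same right-to-left recurrence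
def sufAnds : List Int → List Int
  | [] => [(1 : Int) <<< 20 - 1]
  | a :: rest => PySem.Int.band ((sufAnds rest).headD 0) a :: sufAnds rest

-- Source B's forward loop: pre is the running prefix AND, each element paired with suf[i+1]
def restoreYAltLoop : Int → List (Int × Int) → Int
  | _, [] => -1
  | pre, (a, s) :: rest =>
    if PySem.Int.band pre s = a then a
    else restoreYAltLoop (PySem.Int.band pre a) rest

def restoreY_alt (A : List Int) : Int :=
  restoreYAltLoop ((1 : Int) <<< 20 - 1) (A.zip (sufAnds A).tail)

-- ===== PRECONDITION & SPEC =====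
def Spec_restoreY (A : List Int) (out : Int) : Prop := out = restoreY_alt A
instance (A : List Int) (out : Int) : Decidable (Spec_restoreY A out) := by unfold Spec_restoreY; infer_instance

-- ===== CLAIM (what is proved, stated in full; the proofs are below) =====
def Claim_equal_restoreY : Prop := ∀ (A : List Int), Dom_restoreY A → Spec_restoreY A (restoreY A)

-- ===== LEMMAS AND PROOFS =====

-- Python's bit t of an Int under infinite two's complement
def pyBit (b : Int) (t : Nat) : Bool :=
  if 0 ≤ b then b.toNat.testBit t else !((-b - 1).toNat.testBit t)

-- PySem.Int.band with a nonnegative left argument, at the Nat level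
def natStep (m : Nat) (b : Int) : Nat :=
  if 0 ≤ b then m &&& b.toNat else m - (m &&& (-b - 1).toNat)

theorem band_natCast_left (m : Nat) (b : Int) :
    PySem.Int.band (↑m) b = ↑(natStep m b) := by
  unfold PySem.Int.band natStep
  simp [Int.toNat_natCast]

-- subtracting a submask (m &&& k ⊆ m) is bitwise difference, i.e. xor
theorem sub_and_eq_xor : ∀ (m k : Nat), m - (m &&& k) = m ^^^ (m &&& k) := by
  intro m
  induction m using Nat.strong_induction_on with
  | _ m ih =>
    intro k
    rcases Nat.eq_zero_or_pos m with h0 | hpos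
    · subst h0; simp
    · have ihm := ih (m / 2) (Nat.div_lt_self hpos (by norm_num)) (k / 2)
      have hs2 : (m &&& k) / 2 = m / 2 &&& k / 2 := Nat.and_div_two
      have hx2 : (m ^^^ (m &&& k)) / 2 = m / 2 ^^^ (m / 2 &&& k / 2) := by
        rw [Nat.xor_div_two, hs2]
      have hb1 : (m &&& k).testBit 0 = (m.testBit 0 && k.testBit 0) := Nat.testBit_and ..
      have hb2 : (m ^^^ (m &&& k)).testBit 0 = (m.testBit 0).xor ((m &&& k).testBit 0) := Nat.testBit_xor ..
      simp only [Nat.testBit_zero] at hb1 hb2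
      have hm2 := Nat.mod_two_eq_zero_or_one m
      have hs := Nat.mod_two_eq_zero_or_one (m &&& k)
      have hxm := Nat.mod_two_eq_zero_or_one (m ^^^ (m &&& k))
      have e1 : m = 2 * (m / 2) + m % 2 := (Nat.div_add_mod m 2).symm.trans (by ring)
      have e2 : m &&& k = 2 * (m / 2 &&& k / 2) + (m &&& k) % 2 := by
        rw [← hs2]; omega
      have e3 : m ^^^ (m &&& k) = 2 * (m / 2 ^^^ (m / 2 &&& k / 2)) + (m ^^^ (m &&& k)) % 2 := by
        rw [← hx2]; omega
      have hle : m / 2 &&& k / 2 ≤ m / 2 := Nat.and_le_left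
      have c1 : (m &&& k) % 2 ≤ m % 2 := by
        rcases hs with h | h <;> rcases hm2 with h3 | h3 <;>
          simp [h, h3] at hb1 ⊢ <;> omega
      have c2 : (m ^^^ (m &&& k)) % 2 = m % 2 - (m &&& k) % 2 := by
        rcases hxm with h | h <;> rcases hs with h2 | h2 <;> rcases hm2 with h3 | h3 <;>
          simp [h, h2, h3] at hb2 ⊢ <;> omega
      omega

theorem natStep_testBit (m : Nat) (b : Int) (t : Nat) :
    (natStep m b).testBit t = (m.testBit t && pyBit b t) := by
  unfold natStep pyBit
  split
  · simp [Nat.testBit_and]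
  · rw [sub_and_eq_xor]
    simp only [Nat.testBit_xor, Nat.testBit_and]
    cases m.testBit t <;> cases ((-b - 1).toNat.testBit t) <;> rfl

-- the mask constant (1<<20)-1 at the Nat level
theorem mask_cast : ((1 : Int) <<< 20 - 1) = ((1048575 : Nat) : Int) := by decide

-- ---- prefix AND ----
def preN (m : Nat) (l : List Int) : Nat := l.foldl natStep m

theorem foldl_band_natCast (l : List Int) (m : Nat) :
    l.foldl (fun m b => PySem.Int.band m b) (↑m) = ↑(preN m l) := by
  induction l generalizing m with
  | nil => rfl
  | cons a r ih => simp [preN, List.foldl_cons, band_natCast_left, ih (natStep m a), preN]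

theorem preN_testBit (l : List Int) (m : Nat) (t : Nat) :
    ((preN m l).testBit t = true) ↔ (m.testBit t = true ∧ ∀ b ∈ l, pyBit b t = true) := by
  induction l generalizing m with
  | nil => simp [preN]
  | cons a r ih =>
    simp only [preN, List.foldl_cons] at *
    rw [ih (natStep m a)]
    simp [natStep_testBit]
    tauto

-- ---- suffix AND ----
def sufN : List Int → Nat
  | [] => 1048575
  | a :: r => natStep (sufN r) a

theorem sufAnds_eq (l : List Int) :
    sufAnds l = (↑(sufN l) : Int) :: (sufAnds l).tail := by
  cases l with
  | nil => simp [sufAnds, sufN]; decide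
  | cons a r =>
    simp only [sufAnds, sufN, List.tail_cons]
    rw [sufAnds_eq r]
    simp [band_natCast_left]

theorem sufN_testBit (l : List Int) (t : Nat) :
    ((sufN l).testBit t = true) ↔ ((1048575 : Nat).testBit t = true ∧ ∀ b ∈ l, pyBit b t = true) := by
  induction l with
  | nil => simp [sufN]
  | cons a r ih =>
    simp only [sufN, natStep_testBit, Bool.and_eq_true, ih]
    simp
    tauto

-- ---- A's AND-except-i fold ----
def innerN (A : List Int) (i : Nat) (n : Nat) : Nat :=
  (List.range n).foldl (fun m j => if i ≠ j then natStep m (A.getD j 0) else m) 1048575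

theorem inner_cast_gen (A : List Int) (i : Nat) : ∀ n,
    (List.range n).foldl
      (fun m j => if i ≠ j then PySem.Int.band m (A.getD j 0) else m)
      ((1 : Int) <<< 20 - 1) = ↑(innerN A i n) := by
  intro n
  induction n with
  | zero => simp [innerN]; decide
  | succ n ih =>
    unfold innerN at *
    rw [List.range_succ, List.foldl_append, List.foldl_cons, List.foldl_nil,
      List.foldl_append, List.foldl_cons, List.foldl_nil, ih]
    split
    · rw [band_natCast_left]
    · rfl

theorem inner_cast (A : List Int) (i : Nat) :
    restoreYInner A i = ↑(innerN A i A.length) := inner_cast_gen A i A.length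

theorem innerN_testBit (A : List Int) (i : Nat) (n : Nat) (t : Nat) :
    ((innerN A i n).testBit t = true) ↔
      ((1048575 : Nat).testBit t = true ∧ ∀ j, j < n → j ≠ i → pyBit (A.getD j 0) t = true) := by
  induction n with
  | zero => simp [innerN]
  | succ n ih =>
    unfold innerN at *
    rw [List.range_succ, List.foldl_append, List.foldl_cons, List.foldl_nil]
    by_cases hni : i ≠ n
    · simp only [if_pos (by omega : i ≠ n), natStep_testBit, Bool.and_eq_true, ih]
      constructor
      · rintro ⟨⟨hm, hall⟩, hb⟩
        refine ⟨hm, fun j hj hij => ?_⟩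
        rcases Nat.lt_succ_iff_lt_or_eq.mp hj with h | h
        · exact hall j h hij
        · subst h; exact hb
      · rintro ⟨hm, hall⟩
        exact ⟨⟨hm, fun j hj hij => hall j (by omega) hij⟩, hall n (by omega) (by omega)⟩
    · simp only [if_neg hni, ih]
      constructor
      · rintro ⟨hm, hall⟩
        exact ⟨hm, fun j hj hij => hall j (by omega) hij⟩
      · rintro ⟨hm, hall⟩
        exact ⟨hm, fun j hj hij => hall j (by omega) hij⟩

-- elements of l1 / l2 vs positions ≠ l1.length in l1 ++ a :: l2
theorem getD_index_iff (l1 l2 : List Int) (a : Int) (t : Nat) :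
    (∀ j, j < (l1 ++ a :: l2).length → j ≠ l1.length → pyBit ((l1 ++ a :: l2).getD j 0) t = true)
      ↔ ((∀ b ∈ l1, pyBit b t = true) ∧ (∀ b ∈ l2, pyBit b t = true)) := by
  constructor
  · intro h
    constructor
    · intro b hb
      rcases List.mem_iff_getElem.mp hb with ⟨j, hj, rfl⟩
      have := h j (by simp; omega) (by omega)
      rwa [List.getD_eq_getElem _ _ (by simp; omega), List.getElem_append_left hj] at this
    · intro b hb
      rcases List.mem_iff_getElem.mp hb with ⟨j, hj, rfl⟩
      have := h (l1.length + 1 + j) (by simp; omega) (by omega)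
      rw [List.getD_eq_getElem _ _ (by simp; omega),
        List.getElem_append_right (by omega)] at this
      simpa [show l1.length + 1 + j - l1.length = j + 1 from by omega] using this
  · rintro ⟨h1, h2⟩ j hj hne
    rcases Nat.lt_or_ge j l1.length with hlt | hge
    · rw [List.getD_eq_getElem _ _ hj, List.getElem_append_left hlt]
      exact h1 _ (List.getElem_mem _)
    · have hgt : l1.length < j := by omega
      rw [List.getD_eq_getElem _ _ hj, List.getElem_append_right (by omega)]
      obtain ⟨k, hk⟩ : ∃ k, j - l1.length = k + 1 := ⟨j - l1.length - 1, by omega⟩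
      simp only [hk, List.getElem_cons_succ]
      exact h2 _ (List.getElem_mem _)

-- the pointwise identity: A's AND-except-i equals prefix AND & suffix AND
theorem inner_eq_band (l1 l2 : List Int) (a : Int) :
    restoreYInner (l1 ++ a :: l2) l1.length =
      PySem.Int.band (↑(preN 1048575 l1)) (↑(sufN l2)) := by
  rw [inner_cast, band_natCast_left]
  congr 1
  apply Nat.eq_of_testBit_eq
  intro t
  have hrhs : (natStep (preN 1048575 l1) (↑(sufN l2))).testBit t
      = ((preN 1048575 l1).testBit t && (sufN l2).testBit t) := by
    rw [natStep_testBit]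
    unfold pyBit
    rw [if_pos (by positivity), Int.toNat_natCast]
  rw [hrhs, ← Bool.coe_iff_coe]
  rw [innerN_testBit, Bool.and_eq_true, preN_testBit, sufN_testBit, getD_index_iff]
  tauto

-- the two loops, marched in lockstep over the split point
theorem loop_eq : ∀ (l2 l1 : List Int),
    restoreYLoop (l1 ++ l2) (List.range' l1.length l2.length) =
      restoreYAltLoop (l1.foldl (fun m b => PySem.Int.band m b) ((1 : Int) <<< 20 - 1))
        (l2.zip (sufAnds l2).tail) := by
  intro l2
  induction l2 with
  | nil => intro l1; rfl
  | cons a l2' ih =>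
    intro l1
    have hpre : l1.foldl (fun m b => PySem.Int.band m b) ((1 : Int) <<< 20 - 1)
        = ↑(preN 1048575 l1) := by
      rw [mask_cast, foldl_band_natCast]
    rw [List.length_cons, List.range'_succ, hpre]
    rw [show restoreYLoop (l1 ++ a :: l2') (l1.length :: List.range' (l1.length + 1) l2'.length)
        = (if restoreYInner (l1 ++ a :: l2') l1.length = (l1 ++ a :: l2').getD l1.length 0
        then (l1 ++ a :: l2').getD l1.length 0
        else restoreYLoop (l1 ++ a :: l2') (List.range' (l1.length + 1) l2'.length)) from rfl]
    have hgetD : (l1 ++ a :: l2').getD l1.length 0 = a := by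
      rw [List.getD_eq_getElem _ _ (by simp), List.getElem_append_right (by omega)]
      simp
    have htail : (sufAnds (a :: l2')).tail = sufAnds l2' := rfl
    rw [htail, sufAnds_eq l2']
    rw [show restoreYAltLoop (↑(preN 1048575 l1))
        ((a :: l2').zip ((↑(sufN l2') : Int) :: (sufAnds l2').tail))
        = (if PySem.Int.band (↑(preN 1048575 l1)) (↑(sufN l2')) = a then a
      else restoreYAltLoop (PySem.Int.band (↑(preN 1048575 l1)) a) (l2'.zip (sufAnds l2').tail))
      from rfl]
    rw [hgetD, inner_eq_band]
    split
    · rfl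
    · have ih' := ih (l1 ++ [a])
      rw [List.append_assoc] at ih'
      simp only [List.singleton_append, List.length_append, List.length_cons, List.length_nil] at ih'
      rw [List.foldl_append, List.foldl_cons, List.foldl_nil, hpre] at ih'
      rw [band_natCast_left]
      rw [band_natCast_left] at ih'
      exact ih'

-- ===== VERDICT (by name: the statement is the Claim_ definition above) =====
theorem restoreY_spec : Claim_equal_restoreY := by
  intro A _
  unfold Spec_restoreY restoreY restoreY_alt
  have h := loop_eq A []
  simp only [List.nil_append, List.length_nil, List.foldl_nil] at h
  rw [List.range_eq_range', h]
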